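-- pv_equiv track=rewrite | github.com/antongoransson/advent-of-code-2016 | day07/day07.py | aba_bab
-- ===== SOURCE A (Python) =====
-- def aba_bab(ip):
--     string = ','.join(ip[1])
--     for seq in ip[0]:
--         for i in range(0, len(seq) - 2):
--             c1, c2, c3 = seq[i: i + 3]
--             if c1 == c3 and c1 != c2:
--                 bab_s = c2 + c1 + c2
--                 if bab_s in string:
--                     return True
--     return False
-- ===== SOURCE B (Python) =====
-- def aba_bab(ip):
--     joined = ','.join(ip[1])
--     babs = {(y, x) for x, y, z in zip(joined, joined[1:], joined[2:])
--             if x == z and x != y}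
--     abas = {(a, b) for seq in ip[0] for a, b, c in zip(seq, seq[1:], seq[2:])
--             if a == c and a != b}
--     return not abas.isdisjoint(babs)
-- ===== Notes on version B (the rewrite author's own statement) =====
-- stated objective: alternative
-- what changed: A drives the search from each ABA candidate and runs a substring scan of the joined hypernet string per candidate; B never does a substring search: it summarises supernets into a set of (a,b) ABA pairs and the joined hypernet string into a set of (a,b) pairs whose BAB occurs, and answers by set-disjointness of the two pair sets.
import Mathlib
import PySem

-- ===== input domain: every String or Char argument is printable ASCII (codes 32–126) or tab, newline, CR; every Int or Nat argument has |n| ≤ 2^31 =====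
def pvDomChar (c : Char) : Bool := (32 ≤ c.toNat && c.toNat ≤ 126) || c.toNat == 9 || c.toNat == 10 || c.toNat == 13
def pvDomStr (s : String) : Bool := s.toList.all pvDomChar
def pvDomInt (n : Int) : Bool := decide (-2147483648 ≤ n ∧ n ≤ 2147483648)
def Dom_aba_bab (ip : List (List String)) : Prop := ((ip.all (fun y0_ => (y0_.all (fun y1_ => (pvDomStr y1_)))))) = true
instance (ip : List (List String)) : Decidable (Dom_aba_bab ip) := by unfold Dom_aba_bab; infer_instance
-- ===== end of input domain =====

-- B drops A's per-candidate substring search: it builds one set of ABA pairs from the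
-- supernets and one set of BAB pairs from the joined hypernet string, and answers by
-- set disjointness (an alternative decomposition of the same task).

-- ===== PORT A =====
-- inner loop: for i in range(0, len(seq) - 2): c1,c2,c3 = seq[i:i+3]; …
def abaInnerA (seq : List Char) (string : List Char) : Bool :=
  (PySem.List.pyRange 0 ((seq.length : Int) - 2) 1).any fun i =>
    match PySem.List.slice seq (some i) (some (i + 3)) with
    | [c1, c2, c3] => c1 == c3 && c1 != c2 && PySem.Chars.isIn [c2, c1, c2] string
    | _ => false

def aba_bab (ip : List (List String)) : Bool :=
  let string := PySem.Chars.join [','] ((PySem.List.pyGetD ip 1 []).map String.toList)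
  ((PySem.List.pyGetD ip 0 []).map String.toList).any fun seq => abaInnerA seq string

-- ===== PORT B =====
-- zip(s, s[1:], s[2:]) as a list of character triples
def trips (l : List Char) : List (Char × Char × Char) := l.zip (l.tail.zip l.tail.tail)

def aba_bab_alt (ip : List (List String)) : Bool :=
  let joined := PySem.Chars.join [','] ((PySem.List.pyGetD ip 1 []).map String.toList)
  -- babs = {(y, x) for x, y, z in zip(joined, joined[1:], joined[2:]) if x == z and x != y}
  let babs : PySem.Set (Char × Char) :=
    PySem.Set.ofList (((trips joined).filter (fun t => t.1 == t.2.2 && t.1 != t.2.1)).map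
      (fun t => (t.2.1, t.1)))
  -- abas = {(a, b) for seq in ip[0] for a, b, c in zip(seq, seq[1:], seq[2:]) if a == c and a != b}
  let abas : PySem.Set (Char × Char) :=
    PySem.Set.ofList (((PySem.List.pyGetD ip 0 []).map String.toList).flatMap (fun seq =>
      ((trips seq).filter (fun t => t.1 == t.2.2 && t.1 != t.2.1)).map (fun t => (t.1, t.2.1))))
  -- return not abas.isdisjoint(babs)
  !(PySem.Set.isdisjoint abas babs)

-- ===== PRECONDITION & SPEC =====
-- Pre_ excludes only inputs where Python A raises IndexError (ip[1] with fewer than 2 elements).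
def Pre_aba_bab (ip : List (List String)) : Prop := 2 ≤ ip.length
instance (ip : List (List String)) : Decidable (Pre_aba_bab ip) := by unfold Pre_aba_bab; infer_instance
def pvWitness_aba_bab : List (List String) := [["xyx"], ["axyxb"]]

def Spec_aba_bab (ip : List (List String)) (out : Bool) : Prop := out = aba_bab_alt ip
instance (ip : List (List String)) (out : Bool) : Decidable (Spec_aba_bab ip out) := by unfold Spec_aba_bab; infer_instance

-- ===== CLAIM (what is proved, stated in full; the proofs are below) =====
def Claim_equal_aba_bab : Prop := ∀ (ip : List (List String)), Dom_aba_bab ip → Pre_aba_bab ip → Spec_aba_bab ip (aba_bab ip)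

-- ===== LEMMAS AND PROOFS =====

-- pyRange 0 (len - 2) 1 is the Nat range of window starts
lemma pyRange_len_sub_two (n : Nat) :
    PySem.List.pyRange 0 ((n : Int) - 2) 1 = (List.range (n - 2)).map (Nat.cast) := by
  rcases n with _ | _ | m
  · simp [pysem]
  · simp [pysem]
  · have h2 : ((m + 2 : Nat) : Int) - 2 = ((m : Nat) : Int) := by push_cast; ring
    rw [h2, PySem.List.pyRange_zero_natCast]
    simp

-- Nat-index window loop = any over zipped triples
lemma windows_any : ∀ (l : List Char) (R : Char → Char → Char → Bool),
    ((List.range (l.length - 2)).any fun i =>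
      match (l.drop i).take 3 with
      | [c1, c2, c3] => R c1 c2 c3
      | _ => false)
    = (trips l).any fun t => R t.1 t.2.1 t.2.2
  | [], _ => by simp [trips]
  | [a], _ => by simp [trips]
  | [a, b], _ => by simp [trips]
  | a :: b :: c :: t, R => by
    have ih := windows_any (b :: c :: t) R
    simp only [trips, List.length_cons, List.tail_cons, List.zip_cons_cons, List.any_cons] at ih ⊢
    rw [show (t.length + 1 + 1 + 1 - 2) = t.length + 1 from by omega] at *
    simp only [List.range_succ_eq_map, List.any_cons, List.any_map, Function.comp_def] at *
    congr 1

-- index loop over Int range with Python slices = any over zipped triples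
lemma range_any_eq_zip3_any (l : List Char) (R : Char → Char → Char → Bool) :
    ((PySem.List.pyRange 0 ((l.length : Int) - 2) 1).any fun i =>
      match PySem.List.slice l (some i) (some (i + 3)) with
      | [c1, c2, c3] => R c1 c2 c3
      | _ => false)
    = (trips l).any fun t => R t.1 t.2.1 t.2.2 := by
  rw [pyRange_len_sub_two, List.any_map, ← windows_any l R]
  apply PySem.List.any_congr_mem
  intro i _
  have h3 : ((i : Int) + 3) = ((i : Int) + ((3 : Nat) : Int)) := by norm_num
  simp only [Function.comp_def, h3, PySem.List.slice_natCast_add]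

-- 'bab_s in string' for a length-3 candidate = some zipped triple of string equals it
lemma isIn3_eq (s : List Char) (b a c : Char) :
    PySem.Chars.isIn [b, a, c] s = (trips s).any fun t => t == (b, a, c) := by
  rw [show ((trips s).any fun t => t == (b, a, c))
        = ((trips s).any fun t => ((t.1, t.2.1, t.2.2) : Char × Char × Char) == (b, a, c))
      from rfl]
  rw [← windows_any s (fun c1 c2 c3 => (c1, c2, c3) == (b, a, c))]
  rw [Bool.eq_iff_iff, ← PySem.Chars.exists_prefix_drop_iff_isIn, List.any_eq_true]
  constructor
  · rintro ⟨j, hp⟩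
    have hlen : ([b, a, c] : List Char).length ≤ (s.drop j).length := hp.length_le
    rw [List.length_drop] at hlen
    have heq := List.prefix_iff_eq_take.mp hp
    refine ⟨j, List.mem_range.mpr (by simp at hlen; omega), ?_⟩
    have heq3 : List.take 3 (List.drop j s) = [b, a, c] := by simpa using heq.symm
    rw [heq3]
    simp
  · rintro ⟨i, hi, he⟩
    rcases hw : (s.drop i).take 3 with _ | ⟨c1, _ | ⟨c2, _ | ⟨c3, _ | _⟩⟩⟩ <;>
      rw [hw] at he <;> simp at he
    obtain ⟨h1, h2, h3⟩ := he
    subst h1; subst h2; subst h3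
    exact ⟨i, hw ▸ List.take_prefix 3 _⟩

-- characterization of port A as a Prop
lemma A_iff (ip : List (List String)) :
    aba_bab ip = true ↔
      ∃ seq ∈ (PySem.List.pyGetD ip 0 []).map String.toList, ∃ t ∈ trips seq,
        t.1 = t.2.2 ∧ t.1 ≠ t.2.1 ∧
        ∃ u ∈ trips (PySem.Chars.join [','] ((PySem.List.pyGetD ip 1 []).map String.toList)),
          u = (t.2.1, t.1, t.2.1) := by
  unfold aba_bab
  rw [PySem.List.any_congr_mem (g := fun seq =>
      (trips seq).any fun t => t.1 == t.2.2 && t.1 != t.2.1 &&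
        PySem.Chars.isIn [t.2.1, t.1, t.2.1]
          (PySem.Chars.join [','] ((PySem.List.pyGetD ip 1 []).map String.toList)))
      (fun seq _ => by unfold abaInnerA; exact range_any_eq_zip3_any _ _)]
  simp only [isIn3_eq, List.any_eq_true, Bool.and_eq_true, beq_iff_eq, bne_iff_ne, ne_eq,
    and_assoc]

-- characterization of port B as a Prop
lemma B_iff (ip : List (List String)) :
    aba_bab_alt ip = true ↔
      ∃ p : Char × Char,
        (∃ seq ∈ (PySem.List.pyGetD ip 0 []).map String.toList, ∃ t ∈ trips seq,
          t.1 = t.2.2 ∧ t.1 ≠ t.2.1 ∧ (t.1, t.2.1) = p) ∧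
        (∃ u ∈ trips (PySem.Chars.join [','] ((PySem.List.pyGetD ip 1 []).map String.toList)),
          u.1 = u.2.2 ∧ u.1 ≠ u.2.1 ∧ (u.2.1, u.1) = p) := by
  unfold aba_bab_alt
  rw [Bool.not_eq_eq_eq_not, Bool.not_true, Bool.eq_false_iff, ne_eq,
    PySem.Set.isdisjoint_iff]
  push_neg
  simp only [PySem.Set.mem_ofList, List.mem_flatMap, List.mem_map, List.mem_filter,
    Bool.and_eq_true, beq_iff_eq, bne_iff_ne, ne_eq]
  constructor
  · rintro ⟨p, ⟨seq, hseq, t, ⟨ht, h1, h2⟩, hp⟩, u, ⟨hu, h3, h4⟩, hq⟩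
    exact ⟨p, ⟨seq, hseq, t, ht, h1, h2, hp⟩, u, hu, h3, h4, hq⟩
  · rintro ⟨p, ⟨seq, hseq, t, ht, h1, h2, hp⟩, u, hu, h3, h4, hq⟩
    exact ⟨p, ⟨seq, hseq, t, ⟨ht, h1, h2⟩, hp⟩, u, ⟨hu, h3, h4⟩, hq⟩

-- ===== VERDICT (by name: the statement is the Claim_ definition above) =====
theorem aba_bab_spec : Claim_equal_aba_bab := by
  intro ip _ _
  unfold Spec_aba_bab
  rw [Bool.eq_iff_iff, A_iff, B_iff]
  constructor
  · rintro ⟨seq, hseq, t, ht, h1, h2, u, hu, rfl⟩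
    exact ⟨(t.1, t.2.1), ⟨seq, hseq, t, ht, h1, h2, rfl⟩,
      (t.2.1, t.1, t.2.1), hu, h1 ▸ rfl, fun h => h2 h.symm, rfl⟩
  · rintro ⟨p, ⟨seq, hseq, t, ht, h1, h2, rfl⟩, u, hu, h3, h4, hq⟩
    refine ⟨seq, hseq, t, ht, h1, h2, u, hu, ?_⟩
    obtain ⟨hq1, hq2⟩ := Prod.mk.injEq .. ▸ hq
    have : u = (u.1, u.2.1, u.2.2) := rfl
    rw [this, hq1, hq2, ← h3, hq2]
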